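-- pv_equiv track=rewrite | github.com/priitp2/trctools | tests/test_filer.py | get_aggregates
-- ===== SOURCE A (Python) =====
-- def get_aggregates(batches, pos=None, op=None):
--     cpu = 0
--     elapsed = 0
--     nowait = 0
--     for s in batches:
--         if pos and s[pos] != op:
--             continue
--         if s[4]:
--             cpu += s[4]
--         if s[5]:
--             elapsed += s[5]
--         if s[5] and s[3] != 'WAIT':
--             nowait += s[5]
--     return (cpu, elapsed, nowait)
-- ===== SOURCE B (Python) =====
-- def get_aggregates(batches, pos=None, op=None):
--     kept = [s for s in batches if not pos or s[pos] == op]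
--     cpu = sum(s[4] for s in kept if s[4])
--     elapsed = sum(s[5] for s in kept if s[5])
--     nowait = sum(s[5] for s in kept if s[5] and s[3] != 'WAIT')
--     return (cpu, elapsed, nowait)
-- ===== Notes on version B (the rewrite author's own statement) =====
-- stated objective: idiomatic
-- what changed: Replaces the single loop with three running totals by one filter pass followed by three independent sum() passes, one per aggregate.
import Mathlib
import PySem

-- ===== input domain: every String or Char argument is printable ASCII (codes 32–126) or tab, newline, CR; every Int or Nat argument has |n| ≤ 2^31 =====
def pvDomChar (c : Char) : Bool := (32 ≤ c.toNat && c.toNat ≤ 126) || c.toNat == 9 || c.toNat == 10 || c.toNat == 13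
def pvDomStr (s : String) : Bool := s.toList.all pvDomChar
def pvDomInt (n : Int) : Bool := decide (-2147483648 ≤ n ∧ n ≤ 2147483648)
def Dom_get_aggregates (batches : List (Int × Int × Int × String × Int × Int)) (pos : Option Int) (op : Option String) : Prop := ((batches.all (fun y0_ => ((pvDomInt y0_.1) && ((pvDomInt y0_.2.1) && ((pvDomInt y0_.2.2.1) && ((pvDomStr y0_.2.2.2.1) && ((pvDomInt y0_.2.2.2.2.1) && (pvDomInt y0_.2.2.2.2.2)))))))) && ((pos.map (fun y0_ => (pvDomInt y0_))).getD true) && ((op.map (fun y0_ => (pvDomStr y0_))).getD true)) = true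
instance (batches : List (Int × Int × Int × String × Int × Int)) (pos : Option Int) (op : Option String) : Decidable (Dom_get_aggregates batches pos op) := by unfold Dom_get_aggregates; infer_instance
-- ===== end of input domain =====

-- B replaces A's single loop with three accumulators by one filter pass plus three independent sums (idiomatic decomposition); equivalence proved on Pre_ (A raises IndexError when pos is a truthy out-of-range tuple index and batches is nonempty).


-- ===== PORT A =====
-- Python `pos and s[pos] != op` (the skip condition), for in-range pos (Pre_ excludes the rest).
-- s[pos] is the string field only at index 3 (or -3); at every int field, `int != op` is True
-- in Python since op is None or a str. Exact on Pre_.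
def pvSkip (s : Int × Int × Int × String × Int × Int) (pos : Option Int) (op : Option String) : Bool :=
  -- op is intentionally unused on the int-field branches (Python int != str/None is always True)
  match pos with
  | none => false
  | some p =>
    if p = 0 then false
    else
      let i := if p < 0 then p + 6 else p
      if i = 3 then decide (op ≠ some s.2.2.2.1) else true

def get_aggregates (batches : List (Int × Int × Int × String × Int × Int)) (pos : Option Int) (op : Option String) : Int × Int × Int :=
  batches.foldl (fun (acc : Int × Int × Int) s =>
    if pvSkip s pos op then acc
    else
      let cpu := if s.2.2.2.2.1 ≠ 0 then acc.1 + s.2.2.2.2.1 else acc.1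
      let elapsed := if s.2.2.2.2.2 ≠ 0 then acc.2.1 + s.2.2.2.2.2 else acc.2.1
      let nowait := if s.2.2.2.2.2 ≠ 0 ∧ s.2.2.2.1 ≠ "WAIT" then acc.2.2 + s.2.2.2.2.2 else acc.2.2
      (cpu, elapsed, nowait)) (0, 0, 0)

-- ===== PORT B =====
def get_aggregates_alt (batches : List (Int × Int × Int × String × Int × Int)) (pos : Option Int) (op : Option String) : Int × Int × Int :=
  let kept := batches.filter (fun s => !pvSkip s pos op)
  let cpu := ((kept.filter (fun s => s.2.2.2.2.1 ≠ 0)).map (fun s => s.2.2.2.2.1)).sum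
  let elapsed := ((kept.filter (fun s => s.2.2.2.2.2 ≠ 0)).map (fun s => s.2.2.2.2.2)).sum
  let nowait := ((kept.filter (fun s => s.2.2.2.2.2 ≠ 0 ∧ s.2.2.2.1 ≠ "WAIT")).map (fun s => s.2.2.2.2.2)).sum
  (cpu, elapsed, nowait)

-- ===== PRECONDITION & SPEC =====
-- Pre_ excludes only the inputs where Python raises IndexError: a truthy pos outside the
-- tuple index range [-6,5] together with a nonempty batches (both A and B raise there).
def Pre_get_aggregates (batches : List (Int × Int × Int × String × Int × Int)) (pos : Option Int) (op : Option String) : Prop :=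
  pos = none ∨ pos = some 0 ∨ (∃ p ∈ pos.toList, -6 ≤ p ∧ p ≤ 5) ∨ batches = []
instance (batches : List (Int × Int × Int × String × Int × Int)) (pos : Option Int) (op : Option String) : Decidable (Pre_get_aggregates batches pos op) := by unfold Pre_get_aggregates; infer_instance
def pvWitness_get_aggregates : (List (Int × Int × Int × String × Int × Int)) × Option Int × Option String := ([(1, 2, 3, "X", 4, 5), (1, 2, 3, "WAIT", 0, 7)], some 3, some "X")

def Spec_get_aggregates (batches : List (Int × Int × Int × String × Int × Int)) (pos : Option Int) (op : Option String) (out : Int × Int × Int) : Prop := out = get_aggregates_alt batches pos op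
instance (batches : List (Int × Int × Int × String × Int × Int)) (pos : Option Int) (op : Option String) (out : Int × Int × Int) : Decidable (Spec_get_aggregates batches pos op out) := by unfold Spec_get_aggregates; infer_instance

-- ===== CLAIM (what is proved, stated in full; the proofs are below) =====
def Claim_equal_get_aggregates : Prop := ∀ (batches : List (Int × Int × Int × String × Int × Int)) (pos : Option Int) (op : Option String), Dom_get_aggregates batches pos op → Pre_get_aggregates batches pos op → Spec_get_aggregates batches pos op (get_aggregates batches pos op)

-- ===== LEMMAS AND PROOFS =====
theorem foldl_eq_sums (batches : List (Int × Int × Int × String × Int × Int)) (pos : Option Int) (op : Option String) (acc : Int × Int × Int) :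
    batches.foldl (fun (acc : Int × Int × Int) s =>
      if pvSkip s pos op then acc
      else
        let cpu := if s.2.2.2.2.1 ≠ 0 then acc.1 + s.2.2.2.2.1 else acc.1
        let elapsed := if s.2.2.2.2.2 ≠ 0 then acc.2.1 + s.2.2.2.2.2 else acc.2.1
        let nowait := if s.2.2.2.2.2 ≠ 0 ∧ s.2.2.2.1 ≠ "WAIT" then acc.2.2 + s.2.2.2.2.2 else acc.2.2
        (cpu, elapsed, nowait)) acc
    = (let kept := batches.filter (fun s => !pvSkip s pos op)
       (acc.1 + ((kept.filter (fun s => s.2.2.2.2.1 ≠ 0)).map (fun s => s.2.2.2.2.1)).sum,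
        acc.2.1 + ((kept.filter (fun s => s.2.2.2.2.2 ≠ 0)).map (fun s => s.2.2.2.2.2)).sum,
        acc.2.2 + ((kept.filter (fun s => s.2.2.2.2.2 ≠ 0 ∧ s.2.2.2.1 ≠ "WAIT")).map (fun s => s.2.2.2.2.2)).sum)) := by
  induction batches generalizing acc with
  | nil => simp
  | cons s t ih =>
    rw [List.foldl_cons, ih]
    by_cases hsk : pvSkip s pos op <;> by_cases h4 : s.2.2.2.2.1 = 0 <;>
      by_cases h5 : s.2.2.2.2.2 = 0 <;> by_cases hw : s.2.2.2.1 = "WAIT" <;>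
      simp [hsk, h4, h5, hw, add_assoc]

-- ===== VERDICT (by name: the statement is the Claim_ definition above) =====
theorem get_aggregates_spec : Claim_equal_get_aggregates := by
  intro batches pos op _ _
  unfold Spec_get_aggregates get_aggregates get_aggregates_alt
  rw [foldl_eq_sums]
  simp
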